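-- pv_equiv track=rewrite | github.com/biojuho/vibe-coding | workspace/execution/content_db.py | _derive_ops_status
-- ===== SOURCE A (Python) =====
-- OPS_STATUS_HEALTHY = "healthy"
--
-- OPS_STATUS_WARNING = "warning"
--
-- OPS_STATUS_CRITICAL = "critical"
--
-- OPS_STATUS_SETUP_REQUIRED = "setup_required"
--
-- def _derive_ops_status(issues: list[str]) -> str:
--     if any(issue.startswith("setup:") for issue in issues):
--         return OPS_STATUS_SETUP_REQUIRED
--     if any(issue.startswith("critical:") for issue in issues):
--         return OPS_STATUS_CRITICAL
--     if issues:
--         return OPS_STATUS_WARNING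
--     return OPS_STATUS_HEALTHY
-- ===== SOURCE B (Python) =====
-- OPS_STATUS_HEALTHY = "healthy"
-- OPS_STATUS_WARNING = "warning"
-- OPS_STATUS_CRITICAL = "critical"
-- OPS_STATUS_SETUP_REQUIRED = "setup_required"
--
-- def _derive_ops_status(issues: list[str]) -> str:
--     has_setup = False
--     has_critical = False
--     for issue in issues:
--         if issue.startswith("setup:"):
--             has_setup = True
--         elif issue.startswith("critical:"):
--             has_critical = True
--     if has_setup:
--         return OPS_STATUS_SETUP_REQUIRED
--     if has_critical:
--         return OPS_STATUS_CRITICAL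
--     if issues:
--         return OPS_STATUS_WARNING
--     return OPS_STATUS_HEALTHY
-- ===== Notes on version B (the rewrite author's own statement) =====
-- stated objective: simpler
-- what changed: Replaces the two early-exiting any() scans with one loop that collects has_setup/has_critical flags and a single decision chain afterwards.
import Mathlib
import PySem

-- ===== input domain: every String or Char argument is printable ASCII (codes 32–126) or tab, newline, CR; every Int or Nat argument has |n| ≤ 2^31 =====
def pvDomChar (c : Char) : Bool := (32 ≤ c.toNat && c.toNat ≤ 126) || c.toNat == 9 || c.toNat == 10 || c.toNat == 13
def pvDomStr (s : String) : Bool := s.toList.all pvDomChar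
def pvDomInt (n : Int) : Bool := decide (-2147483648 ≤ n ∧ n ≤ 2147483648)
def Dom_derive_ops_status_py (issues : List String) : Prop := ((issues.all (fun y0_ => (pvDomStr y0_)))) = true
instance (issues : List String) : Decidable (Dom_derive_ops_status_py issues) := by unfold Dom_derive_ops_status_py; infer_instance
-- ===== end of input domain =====

-- B (simpler): one single-pass loop collecting has_setup/has_critical flags replaces A's two early-exiting any() scans; same return value everywhere.


-- ===== PORT A =====
-- Port of A: two any() scans with startswith, then length check.
def derive_ops_status_py (issues : List String) : String :=
  if issues.any (fun issue => PySem.Str.startswith issue "setup:") then "setup_required"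
  else if issues.any (fun issue => PySem.Str.startswith issue "critical:") then "critical"
  else if issues ≠ [] then "warning"
  else "healthy"

-- ===== PORT B =====
-- Port of B: single pass collecting (has_setup, has_critical) flags, then one decision chain.
def derive_ops_status_py_alt (issues : List String) : String :=
  let flags := issues.foldl (fun (fl : Bool × Bool) issue =>
    if PySem.Str.startswith issue "setup:" then (true, fl.2)
    else if PySem.Str.startswith issue "critical:" then (fl.1, true)
    else fl) (false, false)
  if flags.1 then "setup_required"
  else if flags.2 then "critical"
  else if issues ≠ [] then "warning"
  else "healthy"

-- ===== PRECONDITION & SPEC =====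
def Spec_derive_ops_status_py (issues : List String) (out : String) : Prop := out = derive_ops_status_py_alt issues
instance (issues : List String) (out : String) : Decidable (Spec_derive_ops_status_py issues out) := by unfold Spec_derive_ops_status_py; infer_instance

-- ===== CLAIM (what is proved, stated in full; the proofs are below) =====
def Claim_equal_derive_ops_status_py : Prop := ∀ (issues : List String), Dom_derive_ops_status_py issues → Spec_derive_ops_status_py issues (derive_ops_status_py issues)

-- ===== LEMMAS AND PROOFS =====

-- ===== VERDICT (by name: the statement is the Claim_ definition above) =====
lemma flags_eq (issues : List String) (s c : Bool) :
    issues.foldl (fun (fl : Bool × Bool) issue =>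
      if PySem.Str.startswith issue "setup:" then (true, fl.2)
      else if PySem.Str.startswith issue "critical:" then (fl.1, true)
      else fl) (s, c)
    = (s || issues.any (fun i => PySem.Str.startswith i "setup:"),
       c || issues.any (fun i => (!PySem.Str.startswith i "setup:") && PySem.Str.startswith i "critical:")) := by
  induction issues generalizing s c with
  | nil => simp
  | cons h t ih =>
    rw [List.foldl_cons]
    by_cases hs : PySem.Str.startswith h "setup:"
    · rw [if_pos hs, ih]
      simp at hs
      simp [List.any_cons, hs]
    · rw [if_neg hs]
      rw [Bool.not_eq_true] at hs
      by_cases hc : PySem.Str.startswith h "critical:"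
      · rw [if_pos hc, ih]
        simp at hs hc
        simp [List.any_cons, hs, hc]
      · rw [if_neg hc, ih]
        rw [Bool.not_eq_true] at hc
        simp at hs hc
        simp [List.any_cons, hs, hc]

lemma crit_eq (issues : List String)
    (hs : (issues.any fun i => PySem.Str.startswith i "setup:") = false) :
    (issues.any fun i => (!PySem.Str.startswith i "setup:") && PySem.Str.startswith i "critical:")
      = issues.any (fun i => PySem.Str.startswith i "critical:") := by
  induction issues with
  | nil => rfl
  | cons h t ih =>
    rw [List.any_cons, Bool.or_eq_false_iff] at hs
    rw [List.any_cons, List.any_cons, ih hs.2, hs.1]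
    rfl

-- VERDICT
theorem derive_ops_status_py_spec : Claim_equal_derive_ops_status_py := by
  intro issues _
  show derive_ops_status_py issues = derive_ops_status_py_alt issues
  unfold derive_ops_status_py derive_ops_status_py_alt
  simp only [flags_eq, Bool.false_or]
  by_cases hs : (issues.any fun i => PySem.Str.startswith i "setup:") = true
  · rw [if_pos hs, if_pos hs]
  · rw [if_neg hs, if_neg hs, crit_eq issues (Bool.not_eq_true _ ▸ eq_false_of_ne_true hs)]
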